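-- pv_equiv track=rewrite | github.com/samukasmk/studing_algorithmns | 2. Data Structures/2. Arrays: based in lists/exercises/count_duplicated_numbers/quadratic_solution.py | encontra_elementos_duplicados
-- ===== SOURCE A (Python) =====
-- def encontra_elementos_duplicados(lista, m):
--     """
--     Imprime os números que aparecem mais de uma vez na lista de entrada.
--     É garantido que todos os números na lista de entrada estão no intervalo [0, m].
--     """
--     # Retorna zero se a lista de entrada estiver vazia.
--     if not lista:
--         return []
--
--     # Procura por elementos repetidos na lista.
--     duplicatas = []
--     for i in range(len(lista)):
--         for j in range(i + 1, len(lista)):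
--             if lista[i] == lista[j]:
--                 duplicatas.append(lista[j])
--
--     # A saída do algoritmo é a lista de elementos repetidos.
--     return duplicatas
-- ===== SOURCE B (Python) =====
-- def encontra_elementos_duplicados(lista, m):
--     # One pass to count each value, then one pass over positions: the t-th
--     # occurrence (0-based) of a value appearing k times contributes k-1-t copies.
--     total = {}
--     for x in lista:
--         total[x] = total.get(x, 0) + 1
--     seen = {}
--     out = []
--     for x in lista:
--         t = seen.get(x, 0)
--         seen[x] = t + 1
--         out.extend([x] * (total[x] - 1 - t))
--     return out
-- ===== Notes on version B (the rewrite author's own statement) =====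
-- stated objective: faster
-- what changed: Replaces the all-pairs nested scan with two linear passes: one dict pass counting each value, then one pass over positions emitting k-1-t copies of the t-th occurrence of a value appearing k times, reproducing A's order exactly.
import Mathlib
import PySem

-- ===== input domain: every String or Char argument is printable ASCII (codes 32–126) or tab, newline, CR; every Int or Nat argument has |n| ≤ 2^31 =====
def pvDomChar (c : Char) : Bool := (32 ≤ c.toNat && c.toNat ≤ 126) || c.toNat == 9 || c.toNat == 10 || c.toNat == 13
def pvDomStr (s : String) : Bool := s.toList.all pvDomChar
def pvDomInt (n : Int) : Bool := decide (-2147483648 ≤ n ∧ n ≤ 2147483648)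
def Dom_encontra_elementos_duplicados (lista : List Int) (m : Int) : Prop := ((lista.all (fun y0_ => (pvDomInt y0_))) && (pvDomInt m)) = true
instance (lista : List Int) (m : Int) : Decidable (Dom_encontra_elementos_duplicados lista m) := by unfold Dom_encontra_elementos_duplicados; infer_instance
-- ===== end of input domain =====

-- ===== PORT A =====
-- B replaces A's quadratic all-pairs scan with two linear dict passes (same output, same order).
def encontra_elementos_duplicados (lista : List Int) (m : Int) : List Int :=
  if lista = [] then []
  else
    (PySem.List.pyRange 0 (lista.length : Int) 1).foldl (fun duplicatas i =>
      (PySem.List.pyRange (i + 1) (lista.length : Int) 1).foldl (fun duplicatas j =>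
        if PySem.List.pyGetD lista i 0 = PySem.List.pyGetD lista j 0 then
          duplicatas ++ [PySem.List.pyGetD lista j 0]
        else duplicatas) duplicatas) []

-- ===== PORT B =====
def encontra_elementos_duplicados_alt (lista : List Int) (m : Int) : List Int :=
  let total := lista.foldl (fun d x => d.insert x (d.getD x 0 + 1)) (PySem.Dict.empty)
  (lista.foldl (fun (st : PySem.Dict Int Int × List Int) x =>
      let t := st.1.getD x 0
      (st.1.insert x (t + 1), st.2 ++ List.replicate (total.getD x 0 - 1 - t).toNat x))
    (PySem.Dict.empty, [])).2

-- ===== PRECONDITION & SPEC =====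
def Spec_encontra_elementos_duplicados (lista : List Int) (m : Int) (out : List Int) : Prop := out = encontra_elementos_duplicados_alt lista m
instance (lista : List Int) (m : Int) (out : List Int) : Decidable (Spec_encontra_elementos_duplicados lista m out) := by unfold Spec_encontra_elementos_duplicados; infer_instance

-- ===== CLAIM (what is proved, stated in full; the proofs are below) =====
def Claim_equal_encontra_elementos_duplicados : Prop := ∀ (lista : List Int) (m : Int), Dom_encontra_elementos_duplicados lista m → Spec_encontra_elementos_duplicados lista m (encontra_elementos_duplicados lista m)

-- ===== LEMMAS AND PROOFS =====
-- common specification: for each position, its later equal elements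
def pvSpecDup : List Int → List Int
  | [] => []
  | x :: rest => List.replicate (rest.count x) x ++ pvSpecDup rest

theorem pvFilter_rep (l : List Int) (a : Int) :
    l.filter (fun y => decide (a = y)) = List.replicate (l.count a) a := by
  have h : (fun y : Int => decide (a = y)) = (fun y : Int => decide (y = a)) :=
    funext fun y => by simp [eq_comm]
  rw [h, List.filter_eq]

theorem pvCounter_getD (l : List Int) (d : PySem.Dict Int Int) (v : Int) :
    (l.foldl (fun d x => d.insert x (d.getD x 0 + 1)) d).getD v 0
      = d.getD v 0 + l.count v := by
  induction l generalizing d with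
  | nil => simp
  | cons x rest ih =>
      simp only [List.foldl_cons, ih, PySem.Dict.getD_insert, List.count_cons]
      by_cases h : v = x <;> simp [h] <;> omega

theorem pvLoopB (l : List Int) (total : PySem.Dict Int Int) :
    ∀ (seen : PySem.Dict Int Int) (acc : List Int),
    (∀ v, total.getD v 0 = seen.getD v 0 + l.count v) →
    (l.foldl (fun (st : PySem.Dict Int Int × List Int) x =>
        (st.1.insert x (st.1.getD x 0 + 1),
         st.2 ++ List.replicate (total.getD x 0 - 1 - st.1.getD x 0).toNat x))
      (seen, acc)).2 = acc ++ pvSpecDup l := by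
  induction l with
  | nil => intro seen acc _; simp [pvSpecDup]
  | cons x rest ih =>
      intro seen acc htot
      simp only [List.foldl_cons]
      have hx : (total.getD x 0 - 1 - seen.getD x 0).toNat = rest.count x := by
        have := htot x
        simp only [List.count_cons_self] at this
        omega
      have htot' : ∀ v, total.getD v 0 = (seen.insert x (seen.getD x 0 + 1)).getD v 0 + rest.count v := by
        intro v
        rw [PySem.Dict.getD_insert]
        have := htot v
        by_cases h : v = x <;> simp [h, List.count_cons] at this ⊢ <;> omega
      rw [ih (seen.insert x (seen.getD x 0 + 1)) _ htot']
      simp [pvSpecDup, hx]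

theorem pvB_eq_spec (l : List Int) (m : Int) :
    encontra_elementos_duplicados_alt l m = pvSpecDup l := by
  unfold encontra_elementos_duplicados_alt
  rw [pvLoopB]
  · simp
  · intro v
    rw [pvCounter_getD, PySem.Dict.getD_empty]

theorem pvFlat_eq_spec (l : List Int) :
    (List.range l.length).flatMap
        (fun k => (l.drop (k + 1)).filter (fun y => decide (l.getD k 0 = y)))
      = pvSpecDup l := by
  induction l with
  | nil => simp [pvSpecDup]
  | cons x rest ih =>
      rw [List.length_cons, List.range_succ_eq_map, List.flatMap_cons, List.flatMap_map]
      simp only [List.drop_succ_cons, List.getD_cons_succ, List.getD_cons_zero, List.drop_zero]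
      rw [pvSpecDup, ih, pvFilter_rep]

theorem pvA_eq_spec (l : List Int) (m : Int) :
    encontra_elementos_duplicados l m = pvSpecDup l := by
  unfold encontra_elementos_duplicados
  by_cases hnil : l = []
  · simp [hnil, pvSpecDup]
  · simp only [if_neg hnil, ← PySem.List.len_eq]
    have step : ∀ acc : List Int, (PySem.List.pyRange 0 (PySem.List.len l) 1).foldl (fun duplicatas i =>
        (PySem.List.pyRange (i + 1) (PySem.List.len l) 1).foldl (fun duplicatas j =>
          if PySem.List.pyGetD l i 0 = PySem.List.pyGetD l j 0 then
            duplicatas ++ [PySem.List.pyGetD l j 0]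
          else duplicatas) duplicatas) acc
      = (PySem.List.pyRange 0 (PySem.List.len l) 1).foldl (fun duplicatas i =>
          duplicatas ++ (l.drop (i + 1).toNat).filter
            (fun y => decide (PySem.List.pyGetD l i 0 = y))) acc := by
      intro acc
      apply PySem.List.foldl_congr_mem
      intro acc' i hi
      have h0i : (0 : Int) ≤ i := ((PySem.List.mem_pyRange_one).1 hi).1
      rw [PySem.List.foldl_pyRange_pyGetD l 0
            (fun acc y => if PySem.List.pyGetD l i 0 = y then acc ++ [y] else acc) acc'
            (a := i + 1) (by omega)]
      rw [PySem.List.foldl_append_ite_eq_filter]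
    rw [step, PySem.List.foldl_append_eq_flatMap, List.nil_append,
        PySem.List.len_eq, PySem.List.pyRange_zero_natCast, List.flatMap_map]
    rw [← pvFlat_eq_spec l]
    apply List.flatMap_congr
    intro k hk
    have h1 : ((k : Int) + 1).toNat = k + 1 := by omega
    simp [h1]

-- ===== VERDICT (by name: the statement is the Claim_ definition above) =====
theorem encontra_elementos_duplicados_spec : Claim_equal_encontra_elementos_duplicados := by
  intro lista m _
  unfold Spec_encontra_elementos_duplicados
  rw [pvA_eq_spec, pvB_eq_spec]
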